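-- pv_equiv track=rewrite | github.com/jd-develop/aoc2023 | 13/puzzle.py | find_horizontal_symmetry
-- ===== SOURCE A (Python) =====
-- def find_horizontal_symmetry(pattern, impossible_sol=None):
--     """Return the number of lines above the horizontal symmetry axis, or 0 if there is none"""
--     for i, line in enumerate(pattern):
--         if i == 0:
--             continue
--         is_match = True
--         for j in range(1, i+1):
--             lower_i = i-j
--             upper_i = i+j-1
--             if upper_i >= len(pattern):
--                 break
--             if pattern[lower_i] != pattern[upper_i]:
--                 is_match = False
--                 break
--             # if lower_i == 0 or upper_i+1 == len(pattern):
--             #     return i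
--         if is_match and i != impossible_sol:
--             return i
--     return 0
-- ===== SOURCE B (Python) =====
-- def find_horizontal_symmetry(pattern, impossible_sol=None):
--     """Return the number of lines above the horizontal symmetry axis, or 0 if there is none"""
--     n = len(pattern)
--     # Manacher (even centers): rad[i] = largest k with pattern[i-1-j] == pattern[i+j] for all j < k
--     rad = [0] * n
--     center = right = 0
--     for i in range(1, n):
--         k = min(rad[2 * center - i], right - i) if i < right else 0
--         while 0 <= i - k - 1 and i + k < n and pattern[i - k - 1] == pattern[i + k]:
--             k += 1
--         rad[i] = k
--         if i + k > right:
--             center, right = i, i + k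
--     for i in range(1, n):
--         if rad[i] >= min(i, n - i) and i != impossible_sol:
--             return i
--     return 0
-- ===== Notes on version B (the rewrite author's own statement) =====
-- stated objective: alternative
-- what changed: Replaces A's per-candidate outward pairwise re-checking (a fresh inner loop for every axis) by Manacher's even-center algorithm: one pass computes every mirror radius, reusing already-computed radii via the mirror/right-boundary trick, then a second scan returns the first axis whose radius reaches the nearer boundary and differs from impossible_sol; worst-case comparisons drop from quadratic to linear in the number of lines, but on random inputs A's early mismatch break makes both effectively linear, so no measured speedup.
import Mathlib
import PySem

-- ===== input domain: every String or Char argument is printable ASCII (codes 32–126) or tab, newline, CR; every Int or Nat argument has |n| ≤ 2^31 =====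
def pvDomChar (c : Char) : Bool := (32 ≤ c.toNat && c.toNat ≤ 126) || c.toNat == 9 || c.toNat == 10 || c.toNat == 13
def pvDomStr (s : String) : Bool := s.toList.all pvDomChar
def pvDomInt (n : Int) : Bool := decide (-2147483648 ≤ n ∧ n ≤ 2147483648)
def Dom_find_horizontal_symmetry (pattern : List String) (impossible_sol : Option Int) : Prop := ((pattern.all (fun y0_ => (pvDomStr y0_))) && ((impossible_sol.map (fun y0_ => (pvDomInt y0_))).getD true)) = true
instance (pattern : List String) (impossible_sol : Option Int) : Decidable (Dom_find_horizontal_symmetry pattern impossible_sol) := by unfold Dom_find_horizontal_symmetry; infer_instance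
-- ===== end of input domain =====

-- B is a different algorithm (objective: alternative): Manacher's even-center pass computes every
-- mirror radius at once, then a scan picks the first axis whose radius reaches the nearer boundary.

-- ===== PORT A =====
-- inner loop `for j in range(1, i+1)` with its two breaks; returns is_match
def fhsInnerA (pattern : List String) (i : Nat) (j : Nat) : Bool :=
  if _h : j > i then true                                  -- loop exhausted, is_match stays True
  else if i + j - 1 ≥ pattern.length then true             -- `break` (upper_i out of range)
  else if pattern[i-j]? ≠ pattern[i+j-1]? then false       -- `is_match = False; break`
  else fhsInnerA pattern i (j+1)
termination_by i + 1 - j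
decreasing_by omega

-- outer loop `for i, line in enumerate(pattern)`
def fhsOuterA (pattern : List String) (impossible_sol : Option Int) (i : Nat) : Int :=
  if _h : i ≥ pattern.length then 0                        -- loop ended: return 0
  else if i = 0 then fhsOuterA pattern impossible_sol (i+1)  -- `continue`
  else if fhsInnerA pattern i 1 && decide (some (i : Int) ≠ impossible_sol) then (i : Int)
  else fhsOuterA pattern impossible_sol (i+1)
termination_by pattern.length - i
decreasing_by all_goals omega

def find_horizontal_symmetry (pattern : List String) (impossible_sol : Option Int) : Int :=
  fhsOuterA pattern impossible_sol 0

-- ===== PORT B =====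
-- B's `while 0 <= i-k-1 and i+k < n and pattern[i-k-1] == pattern[i+k]: k += 1`
-- (`0 <= i-k-1` on Python ints is exactly `k+1 ≤ i`, so Nat subtraction below is never truncated)
def fhsExtend (p : List String) (i k : Nat) : Nat :=
  if _h : k + 1 ≤ i ∧ i + k < p.length ∧ p[i-k-1]? = p[i+k]? then fhsExtend p i (k+1)
  else k
termination_by p.length - k
decreasing_by omega

-- B's main loop `for i in range(1, n)` carrying (rad, center, right);
-- on every reachable state 1 ≤ 2*center - i ≤ length (proved below), so Nat subtraction is exact
def fhsMan (p : List String) (i : Nat) (rad : List Nat) (c r : Nat) : List Nat :=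
  if _h : i < p.length then
    let k0 := if i < r then min ((rad[2*c - i]?).getD 0) (r - i) else 0
    let k := fhsExtend p i k0
    let rad' := rad.set i k                                -- `rad[i] = k`
    if i + k > r then fhsMan p (i+1) rad' i (i+k)          -- `center, right = i, i + k`
    else fhsMan p (i+1) rad' c r
  else rad
termination_by p.length - i
decreasing_by all_goals omega

-- B's second loop `for i in range(1, n): if rad[i] >= min(i, n-i) and i != impossible_sol: return i`
def fhsScan (rad : List Nat) (n : Nat) (imp : Option Int) (i : Nat) : Int :=
  if _h : i < n then
    if decide (min i (n - i) ≤ (rad[i]?).getD 0) && decide (some (i : Int) ≠ imp) then (i : Int)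
    else fhsScan rad n imp (i+1)
  else 0
termination_by n - i
decreasing_by omega

def find_horizontal_symmetry_alt (pattern : List String) (impossible_sol : Option Int) : Int :=
  fhsScan (fhsMan pattern 1 (List.replicate pattern.length 0) 0 0)
    pattern.length impossible_sol 1

-- ===== PRECONDITION & SPEC =====
def Spec_find_horizontal_symmetry (pattern : List String) (impossible_sol : Option Int) (out : Int) : Prop := out = find_horizontal_symmetry_alt pattern impossible_sol
instance (pattern : List String) (impossible_sol : Option Int) (out : Int) : Decidable (Spec_find_horizontal_symmetry pattern impossible_sol out) := by unfold Spec_find_horizontal_symmetry; infer_instance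

-- ===== CLAIM (what is proved, stated in full; the proofs are below) =====
def Claim_equal_find_horizontal_symmetry : Prop := ∀ (pattern : List String) (impossible_sol : Option Int), Dom_find_horizontal_symmetry pattern impossible_sol → Spec_find_horizontal_symmetry pattern impossible_sol (find_horizontal_symmetry pattern impossible_sol)

-- ===== LEMMAS AND PROOFS =====

-- the invariant of fhsExtend: k is a sound mirror reach at axis i
def fhsGood (p : List String) (i k : Nat) : Prop :=
  k ≤ i ∧ i + k ≤ p.length ∧ ∀ j, j < k → p[i-1-j]? = p[i+j]?

-- the loop's stopping condition
def fhsStop (p : List String) (i k : Nat) : Prop :=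
  ¬ (k + 1 ≤ i ∧ i + k < p.length ∧ p[i-k-1]? = p[i+k]?)

-- the true radius at axis i
def fhsRad (p : List String) (i : Nat) : Nat := fhsExtend p i 0

theorem fhsExtend_good_stop (p : List String) (i : Nat) :
    ∀ f k, p.length - k ≤ f → fhsGood p i k →
      fhsGood p i (fhsExtend p i k) ∧ fhsStop p i (fhsExtend p i k) := by
  intro f
  induction f with
  | zero =>
    intro k hf hg
    rw [fhsExtend]
    by_cases h : k + 1 ≤ i ∧ i + k < p.length ∧ p[i-k-1]? = p[i+k]?
    · omega
    · rw [dif_neg h]; exact ⟨hg, h⟩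
  | succ f ih =>
    intro k hf hg
    rw [fhsExtend]
    by_cases h : k + 1 ≤ i ∧ i + k < p.length ∧ p[i-k-1]? = p[i+k]?
    · rw [dif_pos h]
      refine ih (k+1) (by omega) ⟨by omega, by omega, ?_⟩
      intro j hj
      by_cases hjk : j < k
      · exact hg.2.2 j hjk
      · have : j = k := by omega
        subst this
        have e : i - 1 - j = i - j - 1 := by omega
        rw [e]; exact h.2.2
    · rw [dif_neg h]; exact ⟨hg, h⟩

theorem fhsStop_unique (p : List String) (i : Nat) {m1 m2 : Nat}
    (h1 : fhsGood p i m1) (s1 : fhsStop p i m1)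
    (h2 : fhsGood p i m2) (s2 : fhsStop p i m2) : m1 = m2 := by
  by_contra hne
  have key : ∀ a b : Nat, a < b → fhsGood p i b → fhsStop p i a → False := by
    intro a b hab hg hs
    obtain ⟨hg1, hg2, hg3⟩ := hg
    apply hs
    refine ⟨by omega, by omega, ?_⟩
    have := hg3 a hab
    have e : i - 1 - a = i - a - 1 := by omega
    rw [e] at this
    exact this
  rcases Nat.lt_or_ge m1 m2 with h | h
  · exact key m1 m2 h h2 s1
  · exact key m2 m1 (by omega) h1 s2

theorem fhsExtend_eq_rad (p : List String) (i k : Nat) (hi : i ≤ p.length)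
    (hg : fhsGood p i k) : fhsExtend p i k = fhsRad p i := by
  have h1 := fhsExtend_good_stop p i (p.length) k (by omega) hg
  have h0 : fhsGood p i 0 := ⟨by omega, by omega, by omega⟩
  have h2 := fhsExtend_good_stop p i (p.length) 0 (by omega) h0
  exact fhsStop_unique p i h1.1 h1.2 h2.1 h2.2

theorem fhsRad_good (p : List String) (i : Nat) (hi : i ≤ p.length) :
    fhsGood p i (fhsRad p i) ∧ fhsStop p i (fhsRad p i) :=
  fhsExtend_good_stop p i (p.length) 0 (by omega) ⟨by omega, by omega, by omega⟩

theorem fhsRad_le_min (p : List String) (i : Nat) (hi : i ≤ p.length) :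
    fhsRad p i ≤ min i (p.length - i) := by
  obtain ⟨h1, h2, -⟩ := (fhsRad_good p i hi).1
  omega

theorem fhsRad_zero (p : List String) : fhsRad p 0 = 0 := by
  rw [fhsRad, fhsExtend]
  simp

-- full reach at i ⟺ every pair up to the nearer boundary matches
theorem fhsRad_eq_min_iff (p : List String) (i : Nat) (hi : i < p.length) :
    fhsRad p i = min i (p.length - i) ↔
      ∀ k, k < min i (p.length - i) → p[i-1-k]? = p[i+k]? := by
  constructor
  · intro h k hk
    exact (fhsRad_good p i (by omega)).1.2.2 k (by omega)
  · intro hall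
    have hg : fhsGood p i (min i (p.length - i)) := ⟨by omega, by omega, hall⟩
    have hs : fhsStop p i (min i (p.length - i)) := by
      intro ⟨h1, h2, _⟩
      omega
    exact fhsStop_unique p i (fhsRad_good p i (by omega)).1 (fhsRad_good p i (by omega)).2 hg hs

-- Manacher's mirror argument: the seeded start k0 is a sound reach at axis i
theorem fhsMirror (p : List String) (c i : Nat) (hc : c < i)
    (hcl : c ≤ p.length) (hir : i < c + fhsRad p c) :
    fhsGood p i (min (fhsRad p (2*c - i)) (c + fhsRad p c - i)) := by
  have hgc := (fhsRad_good p c hcl).1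
  have hRc_le : fhsRad p c ≤ c := hgc.1
  have hrl : c + fhsRad p c ≤ p.length := hgc.2.1
  have pal_c : ∀ t, t < fhsRad p c → p[c-1-t]? = p[c+t]? := hgc.2.2
  have hi2c : i < 2*c := by omega
  have hi'l : 2*c - i ≤ p.length := by omega
  have hgi' := (fhsRad_good p (2*c - i) hi'l).1
  have hR'_le : fhsRad p (2*c - i) ≤ 2*c - i := hgi'.1
  have pal_i' : ∀ j, j < fhsRad p (2*c - i) → p[(2*c-i)-1-j]? = p[(2*c-i)+j]? := hgi'.2.2
  refine ⟨by omega, by omega, ?_⟩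
  intro j hj
  -- step A: p[(2c-i)-1-j]? = p[i+j]?
  have hA : p[(2*c-i)-1-j]? = p[i+j]? := by
    have ht1 : i - c + j < fhsRad p c := by omega
    have := pal_c (i - c + j) ht1
    have e1 : c - 1 - (i - c + j) = (2*c-i) - 1 - j := by omega
    have e2 : c + (i - c + j) = i + j := by omega
    rw [e1, e2] at this
    exact this
  -- step B: p[(2c-i)-1-j]? = p[(2c-i)+j]?
  have hB : p[(2*c-i)-1-j]? = p[(2*c-i)+j]? := pal_i' j (by omega)
  -- step C: p[i-1-j]? = p[(2c-i)+j]?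
  have hC : p[i-1-j]? = p[(2*c-i)+j]? := by
    by_cases hcase : i ≤ c + j
    · have ht2 : c + j - i < fhsRad p c := by omega
      have := pal_c (c + j - i) ht2
      have e1 : c - 1 - (c + j - i) = i - 1 - j := by omega
      have e2 : c + (c + j - i) = (2*c-i) + j := by omega
      rw [e1, e2] at this
      exact this
    · have ht2 : i - c - 1 - j < fhsRad p c := by omega
      have := pal_c (i - c - 1 - j) ht2
      have e1 : c - 1 - (i - c - 1 - j) = (2*c-i) + j := by omega
      have e2 : c + (i - c - 1 - j) = i - 1 - j := by omega
      rw [e1, e2] at this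
      exact this.symm
  rw [hC, ← hB, hA]

-- the fhsMan loop fills rad with the true radii
theorem fhsMan_spec (p : List String) :
    ∀ f i rad c r, p.length - i ≤ f → 1 ≤ i → c < i → c ≤ p.length →
      r = c + fhsRad p c → rad.length = p.length →
      (∀ m, m < i → (rad[m]?).getD 0 = fhsRad p m) →
      ∀ m, m < p.length → ((fhsMan p i rad c r)[m]?).getD 0 = fhsRad p m := by
  intro f
  induction f with
  | zero =>
    intro i rad c r hf h1 hci hcl hr hlen hinv m hm
    have hi : ¬ i < p.length := by omega
    rw [fhsMan, dif_neg hi]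
    exact hinv m (by omega)
  | succ f ih =>
    intro i rad c r hf h1 hci hcl hr hlen hinv m hm
    by_cases hi : i < p.length
    · rw [fhsMan, dif_pos hi]
      have hk0good : fhsGood p i (if i < r then min ((rad[2*c - i]?).getD 0) (r - i) else 0) := by
        by_cases hir : i < r
        · rw [if_pos hir]
          have h2ci : 2*c - i < i := by
            have := (fhsRad_good p c hcl).1.1
            omega
          rw [hinv (2*c - i) h2ci, hr]
          exact fhsMirror p c i hci hcl (by omega)
        · rw [if_neg hir]
          exact ⟨by omega, by omega, by omega⟩
      have hk : fhsExtend p i (if i < r then min ((rad[2*c - i]?).getD 0) (r - i) else 0)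
          = fhsRad p i := fhsExtend_eq_rad p i _ (by omega) hk0good
      simp only [hk]
      have hinv' : ∀ m, m < i + 1 → ((rad.set i (fhsRad p i))[m]?).getD 0 = fhsRad p m := by
        intro m hm'
        by_cases hmi : m = i
        · subst hmi
          rw [List.getElem?_set_self (by omega)]
          rfl
        · rw [List.getElem?_set_ne (by omega)]
          exact hinv m (by omega)
      have hlen' : (rad.set i (fhsRad p i)).length = p.length := by
        simp [hlen]
      by_cases hbr : i + fhsRad p i > r
      · rw [if_pos hbr]
        exact ih (i+1) _ i (i + fhsRad p i) (by omega) (by omega) (by omega) (by omega)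
          rfl hlen' hinv' m hm
      · rw [if_neg hbr]
        exact ih (i+1) _ c r (by omega) (by omega) (by omega) hcl hr hlen' hinv' m hm
    · rw [fhsMan, dif_neg hi]
      exact hinv m (by omega)

-- A's inner loop computes the pairwise matches up to the nearer boundary
theorem fhs_drop_all {α : Type} (p : α → Bool) (l : List α) (k : Nat) :
    (l.drop k).all p = ((l[k]?.elim true p) && (l.drop (k+1)).all p) := by
  induction l generalizing k with
  | nil => simp
  | cons a t ih =>
    cases k with
    | zero => simp
    | succ k => simpa using ih k

theorem fhs_inner_eq (pattern : List String) (i : Nat) (hi : i < pattern.length) :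
    ∀ f j, 1 ≤ j → i + 1 - j ≤ f →
      fhsInnerA pattern i j
        = ((List.range (min i (pattern.length - i))).drop (j-1)).all
            (fun k => pattern[i-1-k]? == pattern[i+k]?) := by
  have hempty : ∀ k, min i (pattern.length - i) ≤ k →
      (((List.range (min i (pattern.length - i))).drop k).all
          (fun k => pattern[i-1-k]? == pattern[i+k]?)) = true := by
    intro k hk
    rw [List.drop_eq_nil_of_le (by simpa using hk)]
    simp
  intro f
  induction f with
  | zero =>
    intro j h1 hf
    have hj : j > i := by omega
    rw [fhsInnerA, dif_pos hj, hempty (j-1) (by omega)]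
  | succ f ih =>
    intro j h1 hf
    by_cases hj : j > i
    · rw [fhsInnerA, dif_pos hj, hempty (j-1) (by omega)]
    · rw [fhsInnerA, dif_neg hj]
      by_cases hub : i + j - 1 ≥ pattern.length
      · rw [if_pos hub, hempty (j-1) (by omega)]
      · rw [if_neg hub]
        have hkz : j - 1 < min i (pattern.length - i) := by omega
        have hrel : (List.range (min i (pattern.length - i)))[j-1]? = some (j-1) := by
          simp [hkz]
        rw [fhs_drop_all (fun k => pattern[i-1-k]? == pattern[i+k]?) _ (j-1), hrel]
        have hj1 : j - 1 + 1 = j := by omega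
        have e1 : i - 1 - (j-1) = i - j := by omega
        have e2 : i + (j-1) = i + j - 1 := by omega
        rw [hj1]
        simp only [Option.elim, e1, e2]
        by_cases heq : pattern[i-j]? = pattern[i+j-1]?
        · rw [if_neg (by simpa using heq), ih (j+1) (by omega) (by omega)]
          simp [heq]
        · rw [if_pos heq]
          simp [heq]

-- A's inner-loop verdict coincides with "the radius reaches the nearer boundary"
theorem fhs_inner_iff_rad (pattern : List String) (i : Nat) (hi : i < pattern.length) :
    fhsInnerA pattern i 1
      = decide (min i (pattern.length - i) ≤ fhsRad pattern i) := by
  have h := fhs_inner_eq pattern i hi (i+1) 1 (by omega) (by omega)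
  simp only [Nat.sub_self, List.drop_zero] at h
  rw [h]
  by_cases hall : ∀ k, k < min i (pattern.length - i) → pattern[i-1-k]? = pattern[i+k]?
  · have hrad : fhsRad pattern i = min i (pattern.length - i) :=
      (fhsRad_eq_min_iff pattern i hi).2 hall
    rw [List.all_eq_true.2 (by
      intro x hx
      rw [List.mem_range] at hx
      simpa using hall x hx)]
    simp [hrad]
  · push Not at hall
    obtain ⟨k, hk, hne⟩ := hall
    have h1 : ((List.range (min i (pattern.length - i))).all
        (fun k => pattern[i-1-k]? == pattern[i+k]?)) = false := by
      rw [Bool.eq_false_iff]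
      intro hc
      exact hne (by simpa using List.all_eq_true.1 hc k (List.mem_range.2 hk))
    rw [h1]
    have h2 : fhsRad pattern i ≠ min i (pattern.length - i) := by
      intro hc
      exact hne ((fhsRad_eq_min_iff pattern i hi).1 hc k hk)
    have h3 := fhsRad_le_min pattern i (by omega)
    simp
    omega

-- the two scans agree step by step
theorem fhs_scan_eq (pattern : List String) (impossible_sol : Option Int) (rad : List Nat)
    (hrad : ∀ m, m < pattern.length → (rad[m]?).getD 0 = fhsRad pattern m) :
    ∀ f i, 1 ≤ i → pattern.length - i ≤ f →
      fhsOuterA pattern impossible_sol i = fhsScan rad pattern.length impossible_sol i := by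
  intro f
  induction f with
  | zero =>
    intro i h1 hf
    have hend : i ≥ pattern.length := by omega
    rw [fhsOuterA, dif_pos hend, fhsScan, dif_neg (by omega)]
  | succ f ih =>
    intro i h1 hf
    by_cases hend : i ≥ pattern.length
    · rw [fhsOuterA, dif_pos hend, fhsScan, dif_neg (by omega)]
    · rw [fhsOuterA, dif_neg hend, if_neg (show ¬ i = 0 by omega), fhsScan,
        dif_pos (by omega), fhs_inner_iff_rad pattern i (by omega), hrad i (by omega)]
      split_ifs with hcond
      · rfl
      · exact ih (i+1) (by omega) (by omega)

-- ===== VERDICT (by name: the statement is the Claim_ definition above) =====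
theorem find_horizontal_symmetry_spec : Claim_equal_find_horizontal_symmetry := by
  intro pattern impossible_sol _
  unfold Spec_find_horizontal_symmetry find_horizontal_symmetry find_horizontal_symmetry_alt
  have hman := fhsMan_spec pattern (pattern.length) 1 (List.replicate pattern.length 0) 0 0
    (by omega) (by omega) (by omega) (by omega)
    (by rw [fhsRad_zero])
    (by simp)
    (by
      intro m hm
      have : m = 0 := by omega
      subst this
      rw [fhsRad_zero]
      cases h : pattern.length with
      | zero => simp
      | succ n => simp)
  by_cases h0 : pattern.length = 0
  · rw [fhsOuterA, fhsScan]
    simp [h0]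
  · rw [fhsOuterA, dif_neg (show ¬ (0 ≥ pattern.length) by omega), if_pos rfl]
    exact fhs_scan_eq pattern impossible_sol _ hman (pattern.length) 1 (by omega) (by omega)
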